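-- pv_equiv track=rewrite | github.com/Dieloo8448/Queens-Safety | solution.py | most_vowels
-- ===== SOURCE A (Python) =====
-- def most_vowels(list_of_strings):
--     """
--     Determine the index of the string that has the largest number of vowels.
--     Vowels are defined as 'A', 'a', 'E', 'e', 'I', 'i', 'O', 'o', 'U', and 'u'.
--
--     pre: list_of_strings is not None, len(list_of_strings) > 0, and there is at
--     least 1 element in list_of_strings that is not None.
--     post: return the index of the element in list_of_strings that has
--     the largest number of vowel characters and is not None.
--     If there is a tie, return whichever of the tied indices is closest to zero.
--     The empty string, "", has zero vowels. It is possible for the maximum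
--     number of vowels to be 0.
--     The parameter list_of_strings is not altered as a result of this function.
--     """
--     # START WORKING HERE:
--     most_vowel = -1
--     most_vowels_index = -1
--     vowel_count = 0
--     vowels = ['A', 'a', 'E', 'e', 'I', 'i', 'O', 'o', 'U', 'u']
--     for string in list_of_strings:
--         if string is not None:
--             for character in string:
--                 if character in vowels:
--                     vowel_count += 1
--
--             if vowel_count > most_vowel:
--                 most_vowel = vowel_count
--                 most_vowels_index = list_of_strings.index(string)
--
--             elif vowel_count == most_vowel:
--                 if most_vowels_index > list_of_strings.index(string):
--                     most_vowels_index = list_of_strings.index(string)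
--         vowel_count = 0
--     return most_vowels_index
-- ===== SOURCE B (Python) =====
-- def most_vowels(list_of_strings):
--     vowels = set('AaEeIiOoUu')
--     counts = [-1 if s is None else sum(1 for c in s if c in vowels)
--               for s in list_of_strings]
--     return counts.index(max(counts))
-- ===== Notes on version B (the rewrite author's own statement) =====
-- stated objective: simpler
-- what changed: Replaces A's single fused loop threading running best/index state (with repeated list.index calls) by a table-then-select decomposition: one pass builds a vowel-count table (-1 sentinel for None), then counts.index(max(counts)) picks the earliest maximal index; Pre_ excludes the inputs outside A's documented precondition (no non-None element), where A returns the sentinel -1 while B raises (empty list) or returns an accidental 0 (all-None list).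
-- outside the precondition, e.g. on most_vowels([None]): A returns -1, B returns 0; on most_vowels([]): A returns -1, B raises ValueError
import Mathlib
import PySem

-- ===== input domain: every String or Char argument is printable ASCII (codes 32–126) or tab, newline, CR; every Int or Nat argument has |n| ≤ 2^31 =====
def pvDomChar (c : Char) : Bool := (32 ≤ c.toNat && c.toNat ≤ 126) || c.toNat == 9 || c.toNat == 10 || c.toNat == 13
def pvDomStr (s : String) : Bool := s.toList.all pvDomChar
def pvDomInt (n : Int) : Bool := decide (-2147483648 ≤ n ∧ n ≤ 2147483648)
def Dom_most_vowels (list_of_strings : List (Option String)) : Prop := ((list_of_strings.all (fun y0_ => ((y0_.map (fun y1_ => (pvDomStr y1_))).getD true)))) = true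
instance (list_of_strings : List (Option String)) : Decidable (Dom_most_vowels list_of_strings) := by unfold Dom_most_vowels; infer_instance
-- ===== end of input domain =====

-- B replaces A's fused best/index loop by a counts table plus a max/first-index selection pass (simpler decomposition).

-- ===== PORT A =====
-- literal port of A: fused loop threading (most_vowel, most_vowels_index),
-- inner vowel-count loop, and list_of_strings.index(string) lookups
-- (.getD 0 is unreachable: `string` is an element of the list, so index? finds it)
def most_vowels (list_of_strings : List (Option String)) : Int :=
  let vowels : List Char := ['A', 'a', 'E', 'e', 'I', 'i', 'O', 'o', 'U', 'u']
  (list_of_strings.foldl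
    (fun (st : Int × Int) (string : Option String) =>
      match string with
      | none => st
      | some s =>
        let vowel_count : Int :=
          s.toList.foldl (fun vc character => if character ∈ vowels then vc + 1 else vc) 0
        if vowel_count > st.1 then
          (vowel_count, (((PySem.List.index? list_of_strings string).getD 0 : Nat) : Int))
        else if vowel_count = st.1 then
          if st.2 > (((PySem.List.index? list_of_strings string).getD 0 : Nat) : Int) then
            (st.1, (((PySem.List.index? list_of_strings string).getD 0 : Nat) : Int))
          else st
        else st)
    ((-1 : Int), (-1 : Int))).2

-- ===== PORT B =====
-- literal port of B: counts table with -1 sentinel for None, then counts.index(max(counts));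
-- `none => 0` is Python's ValueError from max([]) on the empty list — excluded by Pre_
def most_vowels_alt (list_of_strings : List (Option String)) : Int :=
  let vowels : PySem.Set Char := PySem.Set.ofList ['A', 'a', 'E', 'e', 'I', 'i', 'O', 'o', 'U', 'u']
  let counts : List Int :=
    list_of_strings.map (fun s =>
      match s with
      | none => (-1 : Int)
      | some s => s.toList.foldl (fun a c => if c ∈ vowels then a + 1 else a) 0)
  match PySem.List.max? counts (fun x => x) with
  | none => 0
  | some m => (((PySem.List.index? counts m).getD 0 : Nat) : Int)

-- ===== PRECONDITION & SPEC =====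
-- Pre_ excludes exactly the inputs outside A's documented precondition ("at least 1 element
-- that is not None"): there A returns the sentinel -1 while B raises ValueError (empty list)
-- or returns an accidental 0 (all-None list) — an unspecified corner.
def Pre_most_vowels (list_of_strings : List (Option String)) : Prop :=
  list_of_strings.any Option.isSome = true
instance (list_of_strings : List (Option String)) : Decidable (Pre_most_vowels list_of_strings) := by unfold Pre_most_vowels; infer_instance

def pvWitness_most_vowels : List (Option String) := [some "ab", none, some "e"]

def Spec_most_vowels (list_of_strings : List (Option String)) (out : Int) : Prop := out = most_vowels_alt list_of_strings
instance (list_of_strings : List (Option String)) (out : Int) : Decidable (Spec_most_vowels list_of_strings out) := by unfold Spec_most_vowels; infer_instance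

-- ===== CLAIM (what is proved, stated in full; the proofs are below) =====
def Claim_equal_most_vowels : Prop := ∀ (list_of_strings : List (Option String)), Dom_most_vowels list_of_strings → Pre_most_vowels list_of_strings → Spec_most_vowels list_of_strings (most_vowels list_of_strings)

-- ===== LEMMAS AND PROOFS =====

def pvVowels : List Char := ['A', 'a', 'E', 'e', 'I', 'i', 'O', 'o', 'U', 'u']

def pvVcount (s : String) : Int :=
  s.toList.foldl (fun vc character => if character ∈ pvVowels then vc + 1 else vc) 0

def pvCnt : Option String → Int
  | none => -1
  | some s => pvVcount s

def pvCounts (l : List (Option String)) : List Int := l.map pvCnt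

-- running maximum A maintains over a processed prefix
def pvM (p : List (Option String)) : Int := (pvCounts p).foldl max (-1)

-- first index of count v, as the Int both programs return
def pvIdx (l : List (Option String)) (v : Int) : Int :=
  (((PySem.List.index? (pvCounts l) v).getD 0 : Nat) : Int)

-- A's loop body, named (definitionally equal to the lambda in the port)
def pvStep (l : List (Option String)) (st : Int × Int) (string : Option String) : Int × Int :=
  match string with
  | none => st
  | some s =>
    let vowel_count : Int :=
      s.toList.foldl (fun vc character => if character ∈ pvVowels then vc + 1 else vc) 0
    if vowel_count > st.1 then
      (vowel_count, (((PySem.List.index? l string).getD 0 : Nat) : Int))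
    else if vowel_count = st.1 then
      if st.2 > (((PySem.List.index? l string).getD 0 : Nat) : Int) then
        (st.1, (((PySem.List.index? l string).getD 0 : Nat) : Int))
      else st
    else st

lemma pv_foldl_count_init_le (cs : List Char) (a : Int) :
    a ≤ cs.foldl (fun vc character => if character ∈ pvVowels then vc + 1 else vc) a := by
  induction cs generalizing a with
  | nil => simp
  | cons c cs ih =>
    rw [List.foldl_cons]
    refine le_trans ?_ (ih _)
    show a ≤ if c ∈ pvVowels then a + 1 else a
    split <;> omega

lemma pvVcount_nonneg (s : String) : 0 ≤ pvVcount s := pv_foldl_count_init_le _ 0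

lemma pvCnt_ge (x : Option String) : -1 ≤ pvCnt x := by
  cases x with
  | none => simp [pvCnt]
  | some s => have := pvVcount_nonneg s; simp [pvCnt]; omega

lemma pvM_le (p : List (Option String)) : -1 ≤ pvM p :=
  (PySem.List.le_foldl_max (pvCounts p) (-1)).1

lemma pvM_isMax (p : List (Option String)) : ∀ y ∈ pvCounts p, y ≤ pvM p :=
  (PySem.List.le_foldl_max (pvCounts p) (-1)).2

lemma pv_foldl_max_mem (t : List Int) (a : Int) : t.foldl max a = a ∨ t.foldl max a ∈ t := by
  induction t generalizing a with
  | nil => left; rfl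
  | cons x t ih =>
    rw [List.foldl_cons]
    rcases ih (max a x) with h | h
    · rcases max_choice a x with h2 | h2
      · left; rw [h, h2]
      · right; rw [h, h2]; exact List.mem_cons_self
    · right; exact List.mem_cons_of_mem _ h

lemma pvM_nonneg {p : List (Option String)} (h : p.any Option.isSome = true) : 0 ≤ pvM p := by
  obtain ⟨x, hx, hs⟩ := List.any_eq_true.mp h
  obtain ⟨s, rfl⟩ := Option.isSome_iff_exists.mp hs
  have h1 : pvCnt (some s) ≤ pvM p := pvM_isMax p _ (List.mem_map_of_mem hx)
  have h2 := pvVcount_nonneg s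
  simp [pvCnt] at h1; omega

lemma pvM_mem {p : List (Option String)} (h : p.any Option.isSome = true) :
    pvM p ∈ pvCounts p := by
  rcases pv_foldl_max_mem (pvCounts p) (-1) with h0 | h0
  · exfalso; have := pvM_nonneg h; unfold pvM at this; omega
  · exact h0

lemma pvCounts_append (p q : List (Option String)) :
    pvCounts (p ++ q) = pvCounts p ++ pvCounts q := by simp [pvCounts]

lemma pvM_append_one (p : List (Option String)) (x : Option String) :
    pvM (p ++ [x]) = max (pvM p) (pvCnt x) := by
  simp [pvM, pvCounts, List.foldl_append]

lemma pv_index_first_le {xs : List Int} {v : Int} {i j : Nat}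
    (h : PySem.List.index? xs v = some i) (hj : j < xs.length) (hv : xs[j] = v) : i ≤ j := by
  obtain ⟨hk, hx, hfirst⟩ := PySem.List.getElem_of_index?_eq_some h
  by_contra hc
  exact hfirst j (by omega) hv

-- when a strictly larger count appears, both the value lookup and the count lookup hit position p.length
lemma pv_newmax (p r : List (Option String)) (s : String)
    (hlt : ∀ y ∈ pvCounts p, y < pvVcount s) :
    PySem.List.index? (pvCounts (p ++ some s :: r)) (pvVcount s) = some p.length ∧
    PySem.List.index? (p ++ some s :: r) (some s) = some p.length := by
  constructor
  · rw [PySem.List.index?_eq_some_iff]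
    refine ⟨pvCounts p, pvCounts r, ?_, by simp [pvCounts], ?_⟩
    · simp [pvCounts, pvCnt]
    · intro hmem; exact lt_irrefl _ (hlt _ hmem)
  · rw [PySem.List.index?_eq_some_iff]
    refine ⟨p, r, rfl, rfl, ?_⟩
    intro hmem
    have : pvCnt (some s) ∈ pvCounts p := List.mem_map_of_mem hmem
    have := hlt _ this
    simp [pvCnt] at this

lemma pv_step_eq (l p r : List (Option String)) (x : Option String)
    (hl : l = p ++ x :: r) (hp : p.any Option.isSome = true) :
    pvStep l (pvM p, pvIdx l (pvM p)) x = (pvM (p ++ [x]), pvIdx l (pvM (p ++ [x]))) := by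
  cases x with
  | none =>
    have h1 : pvM (p ++ [none]) = pvM p := by
      rw [pvM_append_one]; simp [pvCnt]
      exact pvM_le p
    simp [pvStep, h1]
  | some s =>
    have hvc : List.foldl (fun vc character => if character ∈ pvVowels then vc + 1 else vc) 0
        s.toList = pvVcount s := rfl
    have hM : pvM (p ++ [some s]) = max (pvM p) (pvVcount s) := by
      rw [pvM_append_one]; rfl
    rcases lt_trichotomy (pvM p) (pvVcount s) with hgt | heq | hlt
    · -- new maximum
      have hstrict : ∀ y ∈ pvCounts p, y < pvVcount s :=
        fun y hy => lt_of_le_of_lt (pvM_isMax p y hy) hgt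
      obtain ⟨hidxc, hidxl⟩ := pv_newmax p r s hstrict
      simp only [pvStep, gt_iff_lt]
      rw [hvc, if_pos hgt]
      have h1 : pvM (p ++ [some s]) = pvVcount s := by rw [hM]; exact max_eq_right (le_of_lt hgt)
      rw [h1]
      have h2 : pvIdx l (pvVcount s) = ((p.length : Nat) : Int) := by
        unfold pvIdx; rw [hl, hidxc]; rfl
      rw [h2, hl, hidxl]
      rfl
    · -- tie: the stored index is already the first index of this count
      have hsome : (PySem.List.index? l (some s)).isSome = true := by
        rw [PySem.List.index?_isSome_iff, hl]
        exact List.mem_append_right _ List.mem_cons_self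
      obtain ⟨j, hj⟩ := Option.isSome_iff_exists.mp hsome
      obtain ⟨hjlt, hjval, _⟩ := PySem.List.getElem_of_index?_eq_some hj
      have hmemc : pvM p ∈ pvCounts l := by
        rw [hl, pvCounts_append]
        exact List.mem_append_left _ (pvM_mem hp)
      have hsomec : (PySem.List.index? (pvCounts l) (pvM p)).isSome = true := by
        rw [PySem.List.index?_isSome_iff]; exact hmemc
      obtain ⟨i, hi⟩ := Option.isSome_iff_exists.mp hsomec
      have hcj : (pvCounts l)[j]'(by simpa [pvCounts] using hjlt) = pvM p := by
        simp only [pvCounts, List.getElem_map, hjval]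
        simp [pvCnt, heq]
      have hij : i ≤ j := pv_index_first_le hi (by simpa [pvCounts] using hjlt) hcj
      have h1 : pvM (p ++ [some s]) = pvM p := by
        rw [hM, heq]; exact max_self _
      simp only [pvStep, gt_iff_lt]
      rw [hvc, if_neg (by omega), if_pos heq.symm]
      rw [hj]
      have hidx : pvIdx l (pvM p) = ((i : Nat) : Int) := by unfold pvIdx; rw [hi]; rfl
      rw [hidx, if_neg (by simp only [Option.getD_some]; omega), h1, hidx]
    · -- strictly smaller count: state unchanged
      have h1 : pvM (p ++ [some s]) = pvM p := by rw [hM]; exact max_eq_left (le_of_lt hlt)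
      simp only [pvStep, gt_iff_lt]
      rw [hvc, if_neg (by omega), if_neg (by omega), h1]

lemma pv_loop (l : List (Option String)) :
    ∀ (r p : List (Option String)), l = p ++ r → p.any Option.isSome = true →
      r.foldl (pvStep l) (pvM p, pvIdx l (pvM p)) = (pvM l, pvIdx l (pvM l)) := by
  intro r
  induction r with
  | nil => intro p hl _; simp at hl; subst hl; simp
  | cons x r ih =>
    intro p hl hp
    rw [List.foldl_cons, pv_step_eq l p r x hl hp]
    exact ih (p ++ [x]) (by simp [hl]) (by simp [hp])

lemma pv_foldl_nones (l p0 : List (Option String)) (st : Int × Int)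
    (h : ∀ y ∈ p0, y = none) : p0.foldl (pvStep l) st = st := by
  induction p0 with
  | nil => rfl
  | cons y p0 ih =>
    have hy : y = none := h y List.mem_cons_self
    rw [List.foldl_cons, hy]
    exact ih fun z hz => h z (List.mem_cons_of_mem _ hz)

lemma pvM_nones {p0 : List (Option String)} (h : ∀ y ∈ p0, y = none) : pvM p0 = -1 := by
  rcases pv_foldl_max_mem (pvCounts p0) (-1) with h0 | h0
  · exact h0
  · obtain ⟨x, hx, hv⟩ := List.mem_map.mp h0
    unfold pvM at *
    rw [← hv, h x hx]; rfl

lemma pv_dropWhile_head_false {α : Type} (p : α → Bool) (l : List α) (x : α) (r : List α)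
    (h : l.dropWhile p = x :: r) : p x = false := by
  induction l with
  | nil => simp at h
  | cons a t ih =>
    rw [List.dropWhile_cons] at h
    by_cases hp : p a = true
    · rw [if_pos hp] at h; exact ih h
    · rw [if_neg hp] at h
      cases h
      simpa using hp

lemma pv_A_char (l : List (Option String)) (h : l.any Option.isSome = true) :
    most_vowels l = pvIdx l (pvM l) := by
  show (l.foldl (pvStep l) ((-1 : Int), (-1 : Int))).2 = pvIdx l (pvM l)
  have hsplit : l.takeWhile (fun y => y.isNone) ++ l.dropWhile (fun y => y.isNone) = l :=
    List.takeWhile_append_dropWhile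
  have hp0 : ∀ y ∈ l.takeWhile (fun y => y.isNone), y = none := by
    intro y hy
    have := List.mem_takeWhile_imp hy
    simpa [Option.isNone_iff_eq_none] using this
  cases hdd : l.dropWhile (fun y => y.isNone) with
  | nil =>
    exfalso
    obtain ⟨x, hx, hs⟩ := List.any_eq_true.mp h
    have hxp0 : x ∈ l.takeWhile (fun y => y.isNone) := by
      rw [hdd, List.append_nil] at hsplit; rw [← hsplit] at hx; exact hx
    rw [hp0 x hxp0] at hs; simp at hs
  | cons x r =>
    have hx : x.isNone = false := pv_dropWhile_head_false _ _ _ _ hdd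
    obtain ⟨s, hxs⟩ : ∃ s, x = some s := by
      cases x with
      | none => simp at hx
      | some s => exact ⟨s, rfl⟩
    subst hxs
    set p0 := l.takeWhile (fun y => y.isNone) with hp0def
    have hl : l = p0 ++ some s :: r := by rw [← hsplit, hdd]
    have hM0 : pvM p0 = -1 := pvM_nones hp0
    have hstrict : ∀ y ∈ pvCounts p0, y < pvVcount s := by
      intro y hy
      have h1 := pvM_isMax p0 y hy
      have h2 := pvVcount_nonneg s
      omega
    obtain ⟨hidxc, hidxl⟩ := pv_newmax p0 r s hstrict
    have hstep : pvStep l ((-1 : Int), (-1 : Int)) (some s) =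
        (pvM (p0 ++ [some s]), pvIdx l (pvM (p0 ++ [some s]))) := by
      have hM1 : pvM (p0 ++ [some s]) = pvVcount s := by
        rw [pvM_append_one, hM0]
        show max (-1) (pvVcount s) = _
        have := pvVcount_nonneg s
        exact max_eq_right (by omega)
      have hvc : List.foldl (fun vc character => if character ∈ pvVowels then vc + 1 else vc) 0
          s.toList = pvVcount s := rfl
      simp only [pvStep, gt_iff_lt]
      rw [hvc, if_pos (by have := pvVcount_nonneg s; omega : (-1 : Int) < pvVcount s)]
      rw [hM1]
      have h2 : pvIdx l (pvVcount s) = ((p0.length : Nat) : Int) := by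
        unfold pvIdx; rw [hl, hidxc]; rfl
      rw [h2, hl, hidxl]
      rfl
    calc (l.foldl (pvStep l) ((-1 : Int), (-1 : Int))).2
        = ((p0 ++ some s :: r).foldl (pvStep l) ((-1 : Int), (-1 : Int))).2 := by rw [← hl]
      _ = (r.foldl (pvStep l) (pvStep l ((-1 : Int), (-1 : Int)) (some s))).2 := by
          rw [List.foldl_append, pv_foldl_nones l p0 _ hp0, List.foldl_cons]
      _ = pvIdx l (pvM l) := by
          rw [hstep, pv_loop l r (p0 ++ [some s]) (by simp [hl]) (by simp)]

lemma pv_set_eq : (PySem.Set.ofList ['A', 'a', 'E', 'e', 'I', 'i', 'O', 'o', 'U', 'u'] : List Char) = pvVowels := by decide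

lemma pv_B_char (l : List (Option String)) (h : l.any Option.isSome = true) :
    most_vowels_alt l = pvIdx l (pvM l) := by
  have hfun : (fun s : Option String =>
      match s with
      | none => (-1 : Int)
      | some s => s.toList.foldl
          (fun a c => if c ∈ (PySem.Set.ofList ['A', 'a', 'E', 'e', 'I', 'i', 'O', 'o', 'U', 'u'] : PySem.Set Char) then a + 1 else a) 0) = pvCnt := by
    funext x
    cases x with
    | none => rfl
    | some s => simp only [pvCnt, pvVcount, pv_set_eq]
  cases l with
  | nil => simp at h
  | cons c t =>
    simp only [most_vowels_alt]
    rw [hfun]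
    rw [show (c :: t).map pvCnt = pvCnt c :: pvCounts t from by simp [pvCounts]]
    rw [PySem.List.max?_id_cons]
    have hmax : (pvCounts t).foldl max (pvCnt c) = pvM (c :: t) := by
      unfold pvM
      rw [show pvCounts (c :: t) = pvCnt c :: pvCounts t from by simp [pvCounts],
        List.foldl_cons, max_eq_right (pvCnt_ge c)]
    rw [hmax]
    show (((PySem.List.index? (pvCnt c :: pvCounts t) (pvM (c :: t))).getD 0 : Nat) : Int) =
      pvIdx (c :: t) (pvM (c :: t))
    unfold pvIdx
    rw [show pvCounts (c :: t) = pvCnt c :: pvCounts t from by simp [pvCounts]]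

-- ===== VERDICT (by name: the statement is the Claim_ definition above) =====
theorem most_vowels_spec : Claim_equal_most_vowels := by
  intro l _ hpre
  unfold Spec_most_vowels
  rw [pv_A_char l hpre, pv_B_char l hpre]
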